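-- pv_equiv track=rewrite | github.com/war231/forgeai | system/scripts/forgeai_modules/relationship_visualizer.py | _get_connected_entities
-- ===== SOURCE A (Python) =====
-- from typing import Dict, List, Optional, Any, Set, Tuple
--
-- def _get_connected_entities(entity_id: str, relationships: List[Dict],
--                              max_depth: int) -> Set[str]:
--     """获取与指定实体相连的所有实体"""
--     connected = {entity_id}
--     frontier = {entity_id}
--
--     for _ in range(max_depth):
--         new_frontier = set()
--         for r in relationships:
--             fe = r.get("from_entity", "")
--             te = r.get("to_entity", "")
--             if fe in frontier and te not in connected:
--                 new_frontier.add(te)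
--             if te in frontier and fe not in connected:
--                 new_frontier.add(fe)
--         connected.update(new_frontier)
--         frontier = new_frontier
--         if not frontier:
--             break
--
--     return connected
-- ===== SOURCE B (Python) =====
-- def _get_connected_entities(entity_id, relationships, max_depth):
--     """BFS over a prebuilt adjacency index: one pass to build adj, one queue traversal."""
--     adj = {}
--     for r in relationships:
--         fe = r.get("from_entity", "")
--         te = r.get("to_entity", "")
--         adj.setdefault(fe, []).append(te)
--         adj.setdefault(te, []).append(fe)
--     visited = {entity_id}
--     queue = [(entity_id, 0)]
--     i = 0
--     while i < len(queue):
--         node, depth = queue[i]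
--         i += 1
--         if depth < max_depth:
--             for nb in adj.get(node, []):
--                 if nb not in visited:
--                     visited.add(nb)
--                     queue.append((nb, depth + 1))
--     return visited
-- ===== Notes on version B (the rewrite author's own statement) =====
-- stated objective: alternative
-- what changed: A rescans the whole relationship list once per BFS layer; B builds a symmetric adjacency index in one pass and then runs a single queue-based BFS with a per-node depth, visiting each discovered node once.
import Mathlib
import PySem

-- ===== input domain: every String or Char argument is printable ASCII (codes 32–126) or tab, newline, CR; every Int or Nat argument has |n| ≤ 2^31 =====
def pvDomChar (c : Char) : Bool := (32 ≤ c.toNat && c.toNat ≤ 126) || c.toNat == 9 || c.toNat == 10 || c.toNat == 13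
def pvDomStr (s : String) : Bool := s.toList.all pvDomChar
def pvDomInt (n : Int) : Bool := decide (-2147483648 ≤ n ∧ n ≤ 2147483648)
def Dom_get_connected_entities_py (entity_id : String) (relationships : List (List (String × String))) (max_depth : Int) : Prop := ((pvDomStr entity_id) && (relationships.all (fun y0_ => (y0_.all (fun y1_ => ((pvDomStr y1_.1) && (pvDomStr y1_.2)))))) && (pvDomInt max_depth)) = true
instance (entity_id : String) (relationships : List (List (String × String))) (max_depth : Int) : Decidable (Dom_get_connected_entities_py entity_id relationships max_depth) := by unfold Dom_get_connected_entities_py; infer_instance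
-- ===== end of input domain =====

-- B replaces A's per-layer rescans of the relationship list by one adjacency index plus a single
-- queue BFS with per-node depth (objective: alternative). Both Pythons return a set of strings; a
-- Python set's iteration order is not semantic, so both ports return the set as its sorted element list.

-- shared trivial helper: r.get(key, default) on an association list (first match)
def pvRGet (r : List (String × String)) (k d : String) : String :=
  match r.find? (fun p => p.1 == k) with
  | some p => p.2
  | none => d

-- ===== PORT A =====
-- inner 'for r in relationships' loop building new_frontier
def aNewFrontier (relationships : List (List (String × String)))
    (frontier connected : PySem.Set String) : PySem.Set String :=
  relationships.foldl (fun nf r =>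
    let fe := pvRGet r "from_entity" ""
    let te := pvRGet r "to_entity" ""
    let nf := if frontier.contains fe && !(connected.contains te) then PySem.Set.add nf te else nf
    if frontier.contains te && !(connected.contains fe) then PySem.Set.add nf fe else nf)
    PySem.Set.empty

-- 'for _ in range(max_depth)' with the 'if not frontier: break'
def aLoop (relationships : List (List (String × String))) :
    Nat → PySem.Set String → PySem.Set String → PySem.Set String
  | 0, connected, _ => connected
  | n + 1, connected, frontier =>
    let nf := aNewFrontier relationships frontier connected
    let connected' := PySem.Set.update connected nf
    if nf = [] then connected' else aLoop relationships n connected' nf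

def get_connected_entities_py (entity_id : String) (relationships : List (List (String × String))) (max_depth : Int) : List String :=
  -- range(max_depth) has max_depth.toNat iterations; the returned set, rendered as a sorted list
  PySem.List.sorted
    (aLoop relationships max_depth.toNat (PySem.Set.ofList [entity_id]) (PySem.Set.ofList [entity_id]))
    (fun x => x) false

-- ===== PORT B =====
-- adjacency build: adj.setdefault(fe, []).append(te); adj.setdefault(te, []).append(fe)
def bAdj (relationships : List (List (String × String))) : PySem.Dict String (List String) :=
  relationships.foldl (fun adj r =>
    let fe := pvRGet r "from_entity" ""
    let te := pvRGet r "to_entity" ""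
    let adj := adj.modify fe [] (fun l => l ++ [te])
    adj.modify te [] (fun l => l ++ [fe]))
    PySem.Dict.empty

-- the 'while i < len(queue)' loop; state = (visited, queue suffix not yet processed).
-- fuel: the loop pops once per enqueued entry, and every enqueue after the first inserts a fresh
-- node into visited, so at most 1 + (2*len(relationships) + 1) pops ever happen; fuel 2*len+2
-- is proved never to run out (theorem sim below), so this is the Python while loop exactly.
def bBfs (adj : PySem.Dict String (List String)) (max_depth : Int) :
    Nat → PySem.Set String → List (String × Int) → PySem.Set String
  | 0, visited, _ => visited
  | _ + 1, visited, [] => visited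
  | fuel + 1, visited, (node, depth) :: rest =>
    if depth < max_depth then
      let vq := (adj.getD node []).foldl
        (fun (vq : PySem.Set String × List (String × Int)) nb =>
          if vq.1.contains nb then vq else (PySem.Set.add vq.1 nb, vq.2 ++ [(nb, depth + 1)]))
        (visited, rest)
      bBfs adj max_depth fuel vq.1 vq.2
    else bBfs adj max_depth fuel visited rest

def get_connected_entities_py_alt (entity_id : String) (relationships : List (List (String × String))) (max_depth : Int) : List String :=
  PySem.List.sorted
    (bBfs (bAdj relationships) max_depth (2 * relationships.length + 2)
      (PySem.Set.ofList [entity_id]) [(entity_id, 0)])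
    (fun x => x) false

-- ===== PRECONDITION & SPEC =====
def Spec_get_connected_entities_py (entity_id : String) (relationships : List (List (String × String))) (max_depth : Int) (out : List String) : Prop := out = get_connected_entities_py_alt entity_id relationships max_depth
instance (entity_id : String) (relationships : List (List (String × String))) (max_depth : Int) (out : List String) : Decidable (Spec_get_connected_entities_py entity_id relationships max_depth out) := by unfold Spec_get_connected_entities_py; infer_instance

-- ===== CLAIM (what is proved, stated in full; the proofs are below) =====
def Claim_equal_get_connected_entities_py : Prop := ∀ (entity_id : String) (relationships : List (List (String × String))) (max_depth : Int), Dom_get_connected_entities_py entity_id relationships max_depth → Spec_get_connected_entities_py entity_id relationships max_depth (get_connected_entities_py entity_id relationships max_depth)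

-- ===== LEMMAS AND PROOFS =====

-- the symmetric edge relation both programs explore
def pvEdge (relationships : List (List (String × String))) (x y : String) : Prop :=
  ∃ r ∈ relationships,
    (pvRGet r "from_entity" "" = x ∧ pvRGet r "to_entity" "" = y) ∨
    (pvRGet r "from_entity" "" = y ∧ pvRGet r "to_entity" "" = x)

theorem pvEdge_cons (r : List (String × String)) (rels : List (List (String × String))) (x y : String) :
    pvEdge (r :: rels) x y ↔
      ((pvRGet r "from_entity" "" = x ∧ pvRGet r "to_entity" "" = y) ∨
       (pvRGet r "from_entity" "" = y ∧ pvRGet r "to_entity" "" = x)) ∨ pvEdge rels x y := by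
  simp [pvEdge]

-- fresh neighbours, in order, relative to a visited set
def pvDelta (V : List String) : List String → List String
  | [] => []
  | nb :: nbs => if nb ∈ V then pvDelta V nbs else nb :: pvDelta (V ++ [nb]) nbs

-- abstract layered form of B's queue loop: budget, visited, current band, next band
def fLayers (adj : PySem.Dict String (List String)) :
    Nat → PySem.Set String → List String → List String → PySem.Set String
  | 0, V, _, _ => V
  | b + 1, V, [], M => if M = [] then V else fLayers adj b V M []
  | b + 1, V, x :: L, M =>
    let δ := pvDelta V (adj.getD x [])
    fLayers adj (b + 1) (V ++ δ) L (M ++ δ)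
  termination_by b _ L _ => (b, L.length)

-- one whole band processed at once
def gBand (adj : PySem.Dict String (List String)) :
    List String → PySem.Set String → List String → PySem.Set String × List String
  | [], V, M => (V, M)
  | x :: L, V, M =>
    let δ := pvDelta V (adj.getD x [])
    gBand adj L (V ++ δ) (M ++ δ)

theorem mem_pvDelta (y : String) : ∀ (nbs V : List String), y ∈ pvDelta V nbs ↔ y ∈ nbs ∧ y ∉ V := by
  intro nbs
  induction nbs with
  | nil => intro V; simp [pvDelta]
  | cons nb nbs ih =>
    intro V
    simp only [pvDelta]
    split_ifs with h
    · rw [ih]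
      constructor
      · rintro ⟨h1, h2⟩; exact ⟨List.mem_cons.mpr (Or.inr h1), h2⟩
      · rintro ⟨h1, h2⟩
        rcases List.mem_cons.mp h1 with rfl | h1
        · exact absurd h h2
        · exact ⟨h1, h2⟩
    · simp only [List.mem_cons, ih, List.mem_append]
      by_cases hy : y = nb <;> simp [hy, h]

theorem nodup_pvDelta : ∀ (nbs V : List String), (pvDelta V nbs).Nodup := by
  intro nbs
  induction nbs with
  | nil => intro V; simp [pvDelta]
  | cons nb nbs ih =>
    intro V
    simp only [pvDelta]
    split_ifs with h
    · exact ih V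
    · refine List.Nodup.cons ?_ (ih (V ++ [nb]))
      intro hmem
      have := (mem_pvDelta nb nbs (V ++ [nb])).mp hmem
      simp at this

theorem adj_mem_aux (x y : String) :
    ∀ (rels : List (List (String × String))) (d : PySem.Dict String (List String)),
    y ∈ (rels.foldl (fun adj r =>
      let fe := pvRGet r "from_entity" ""
      let te := pvRGet r "to_entity" ""
      let adj := adj.modify fe [] (fun l => l ++ [te])
      adj.modify te [] (fun l => l ++ [fe])) d).getD x []
    ↔ y ∈ d.getD x [] ∨ pvEdge rels x y := by
  intro rels
  induction rels with
  | nil => intro d; simp [pvEdge]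
  | cons r rels ih =>
    intro d
    rw [List.foldl_cons, ih, pvEdge_cons]
    simp only [PySem.Dict.getD_modify]
    split_ifs with h1 h2 <;> subst_eqs <;> aesop

theorem adj_mem (relationships : List (List (String × String))) (x y : String) :
    y ∈ (bAdj relationships).getD x [] ↔ pvEdge relationships x y := by
  rw [bAdj, adj_mem_aux]
  simp [PySem.Dict.getD_empty]

set_option maxHeartbeats 1000000 in
theorem aNF_aux (F C : PySem.Set String) (y : String) :
    ∀ (rels : List (List (String × String))) (s : PySem.Set String),
    y ∈ (rels.foldl (fun nf r =>
      let fe := pvRGet r "from_entity" ""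
      let te := pvRGet r "to_entity" ""
      let nf := if F.contains fe && !(C.contains te) then PySem.Set.add nf te else nf
      if F.contains te && !(C.contains fe) then PySem.Set.add nf fe else nf) s)
    ↔ y ∈ s ∨ (y ∉ C ∧ ∃ x ∈ F, pvEdge rels x y) := by
  intro rels
  induction rels with
  | nil => intro s; simp [pvEdge]
  | cons r rels ih =>
    intro s
    rw [List.foldl_cons, ih]
    simp only [pvEdge_cons]
    split_ifs with h1 h2 h3 <;>
      simp only [Bool.and_eq_true, Bool.not_eq_true',
        ← PySem.Set.contains_iff] at * <;>
      simp only [PySem.Set.contains_iff, Bool.eq_false_iff, ne_eq] at * <;>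
      aesop

theorem aNF_mem (relationships : List (List (String × String)))
    (F C : PySem.Set String) (y : String) :
    y ∈ aNewFrontier relationships F C ↔ y ∉ C ∧ ∃ x ∈ F, pvEdge relationships x y := by
  rw [aNewFrontier, aNF_aux]
  simp [PySem.Set.empty]

theorem gBand_fst_mem (adj : PySem.Dict String (List String)) (y : String) :
    ∀ (L : List String) (V : PySem.Set String) (M : List String),
    y ∈ (gBand adj L V M).1 ↔ y ∈ V ∨ ∃ x ∈ L, y ∈ adj.getD x [] := by
  intro L
  induction L with
  | nil => intro V M; simp [gBand]
  | cons x L ih =>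
    intro V M
    simp only [gBand, ih, List.mem_append, mem_pvDelta, List.mem_cons]
    by_cases hv : y ∈ V <;> aesop

theorem gBand_snd_mem (adj : PySem.Dict String (List String)) (y : String) :
    ∀ (L : List String) (V : PySem.Set String) (M : List String),
    y ∈ (gBand adj L V M).2 ↔ y ∈ M ∨ ∃ x ∈ L, y ∈ adj.getD x [] ∧ y ∉ V := by
  intro L
  induction L with
  | nil => intro V M; simp [gBand]
  | cons x L ih =>
    intro V M
    simp only [gBand, ih, List.mem_append, mem_pvDelta, List.mem_cons]
    by_cases hv : y ∈ V <;> by_cases hd : y ∈ pvDelta V (adj.getD x []) <;>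
      simp only [mem_pvDelta] at hd <;> aesop

theorem gBand_fst_nodup (adj : PySem.Dict String (List String)) :
    ∀ (L : List String) (V : PySem.Set String) (M : List String),
    V.Nodup → (gBand adj L V M).1.Nodup := by
  intro L
  induction L with
  | nil => intro V M h; exact h
  | cons x L ih =>
    intro V M h
    refine ih _ _ (List.Nodup.append h (nodup_pvDelta _ _) ?_)
    intro a ha hb
    exact ((mem_pvDelta a _ _).mp hb).2 ha

theorem fLayers_band (adj : PySem.Dict String (List String)) (b : Nat) :
    ∀ (L : List String) (V : PySem.Set String) (M : List String),
    fLayers adj (b + 1) V L M =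
      (if (gBand adj L V M).2 = [] then (gBand adj L V M).1
       else fLayers adj b (gBand adj L V M).1 (gBand adj L V M).2 []) := by
  intro L
  induction L with
  | nil => intro V M; rw [fLayers]; rfl
  | cons x L ih =>
    intro V M
    rw [fLayers]
    exact ih _ _

theorem nodup_fLayers (adj : PySem.Dict String (List String)) :
    ∀ (b : Nat) (V : PySem.Set String) (L M : List String), V.Nodup → (fLayers adj b V L M).Nodup := by
  intro b
  induction b with
  | zero => intro V L M h; rw [fLayers]; exact h
  | succ b ih =>
    intro V L M h
    rw [fLayers_band]
    split_ifs with hM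
    · exact gBand_fst_nodup adj L V M h
    · exact ih _ _ _ (gBand_fst_nodup adj L V M h)

theorem nodup_aLoop (relationships : List (List (String × String))) :
    ∀ (n : Nat) (C F : PySem.Set String), C.Nodup → (aLoop relationships n C F).Nodup := by
  intro n
  induction n with
  | zero => intro C F h; exact h
  | succ n ih =>
    intro C F h
    rw [aLoop]
    have h' := PySem.Set.nodup_update C (aNewFrontier relationships F C) h
    split_ifs with hnf
    · exact h'
    · exact ih _ _ h'

-- A's layer recursion and B's layered abstraction agree in membership
theorem align (relationships : List (List (String × String))) :
    ∀ (n : Nat) (C F V : PySem.Set String) (L : List String),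
    (∀ x, x ∈ C ↔ x ∈ V) → (∀ x, x ∈ F ↔ x ∈ L) →
    ∀ y, y ∈ aLoop relationships n C F ↔ y ∈ fLayers (bAdj relationships) n V L [] := by
  intro n
  induction n with
  | zero => intro C F V L hCV hFL y; rw [aLoop, fLayers]; exact hCV y
  | succ n ih =>
    intro C F V L hCV hFL y
    rw [aLoop, fLayers_band]
    set nf := aNewFrontier relationships F C with hnf
    set G := gBand (bAdj relationships) L V []
    have hmm : ∀ z, z ∈ nf ↔ z ∈ G.2 := by
      intro z
      rw [hnf, aNF_mem, gBand_snd_mem]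
      simp only [List.not_mem_nil, false_or, adj_mem]
      constructor
      · rintro ⟨hz, x, hx, he⟩; exact ⟨x, (hFL x).mp hx, he, fun hzv => hz ((hCV z).mpr hzv)⟩
      · rintro ⟨x, hx, he, hz⟩; exact ⟨fun hzc => hz ((hCV z).mp hzc), x, (hFL x).mpr hx, he⟩
    have hCV' : ∀ z, z ∈ PySem.Set.update C nf ↔ z ∈ G.1 := by
      intro z
      rw [PySem.Set.mem_update, gBand_fst_mem]
      constructor
      · rintro (hz | hz)
        · exact Or.inl ((hCV z).mp hz)
        · rcases (aNF_mem relationships F C z).mp hz with ⟨hzc, x, hx, he⟩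
          exact Or.inr ⟨x, (hFL x).mp hx, (adj_mem relationships x z).mpr he⟩
      · rintro (hz | ⟨x, hx, he⟩)
        · exact Or.inl ((hCV z).mpr hz)
        · by_cases hzc : z ∈ C
          · exact Or.inl hzc
          · exact Or.inr ((aNF_mem relationships F C z).mpr
              ⟨hzc, x, (hFL x).mpr hx, (adj_mem relationships x z).mp he⟩)
    have hempty : (nf = []) ↔ (G.2 = []) := by
      constructor <;> intro h <;>
        rw [List.eq_nil_iff_forall_not_mem] at * <;> intro z
      · exact fun hz => h z ((hmm z).mpr hz)
      · exact fun hz => h z ((hmm z).mp hz)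
    by_cases hnil : nf = []
    · rw [if_pos hnil, if_pos (hempty.mp hnil)]
      exact hCV' y
    · rw [if_neg hnil, if_neg (fun h => hnil (hempty.mpr h))]
      exact ih _ _ _ _ hCV' hmm y

-- ===== fuel adequacy and queue/layer simulation for B =====

def pvAllNodes (relationships : List (List (String × String))) : List String :=
  relationships.flatMap (fun r => [pvRGet r "from_entity" "", pvRGet r "to_entity" ""])

def pvNotV (relationships : List (List (String × String))) (V : List String) : Nat :=
  ((PySem.Set.ofList (pvAllNodes relationships)).filter (fun x => decide (x ∉ V))).length

theorem filter_split_len (S δ V : List String) (hS : S.Nodup) (hδ : δ.Nodup)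
    (hsub : ∀ y ∈ δ, y ∈ S) (hdisj : ∀ y ∈ δ, y ∉ V) :
    (S.filter (fun x => decide (x ∉ (V ++ δ)))).length + δ.length
      = (S.filter (fun x => decide (x ∉ V))).length := by
  have hperm : (S.filter (fun x => decide (x ∉ V))).Perm
      ((S.filter (fun x => decide (x ∉ (V ++ δ)))) ++ δ) := by
    apply (List.perm_ext_iff_of_nodup (List.Nodup.filter _ hS) ?_).mpr
    · intro a
      simp only [List.mem_filter, List.mem_append, decide_eq_true_eq, not_or]
      by_cases ha : a ∈ δ
      · simp only [ha, or_true, iff_true]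
        exact ⟨hsub a ha, hdisj a ha⟩
      · constructor
        · rintro ⟨h1, h2⟩; exact Or.inl ⟨h1, h2, ha⟩
        · rintro (⟨h1, h2, _⟩ | h)
          · exact ⟨h1, h2⟩
          · exact absurd h ha
    · refine List.Nodup.append (List.Nodup.filter _ hS) hδ ?_
      intro a ha hb
      have := (List.mem_filter.mp ha).2
      simp only [decide_eq_true_eq, List.mem_append, not_or] at this
      exact this.2 hb
  have hl := hperm.length_eq
  rw [List.length_append] at hl
  omega

theorem inner_spec (dpt : Int) :
    ∀ (nbs : List String) (V : PySem.Set String) (q : List (String × Int)),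
    nbs.foldl (fun (vq : PySem.Set String × List (String × Int)) nb =>
        if vq.1.contains nb then vq else (PySem.Set.add vq.1 nb, vq.2 ++ [(nb, dpt)])) (V, q)
    = (V ++ pvDelta V nbs, q ++ (pvDelta V nbs).map (fun y => (y, dpt))) := by
  intro nbs
  induction nbs with
  | nil => intro V q; simp [pvDelta]
  | cons nb nbs ih =>
    intro V q
    rw [List.foldl_cons]
    by_cases h : nb ∈ V
    · have hc : (PySem.Set.contains V nb) = true := (PySem.Set.contains_iff V nb).mpr h
      simp only [hc, if_pos, pvDelta, if_pos h]
      exact ih V q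
    · have hc : (PySem.Set.contains V nb) = false := by
        rcases Bool.eq_false_or_eq_true (PySem.Set.contains V nb) with h' | h'
        · exact absurd ((PySem.Set.contains_iff V nb).mp h') h
        · exact h'
      simp only [hc, Bool.false_eq_true, pvDelta]
      rw [if_neg h, PySem.Set.add_of_not_mem h, ih]
      simp

theorem edge_mem_allNodes (relationships : List (List (String × String))) (x y : String)
    (h : pvEdge relationships x y) : y ∈ pvAllNodes relationships := by
  obtain ⟨r, hr, hc⟩ := h
  refine List.mem_flatMap.mpr ⟨r, hr, ?_⟩
  rcases hc with ⟨h1, h2⟩ | ⟨h1, h2⟩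
  · simp [h2]
  · simp [h1]

theorem bBfs_drain (adj : PySem.Dict String (List String)) (md : Int) :
    ∀ (fuel : Nat) (q : List (String × Int)) (V : PySem.Set String),
    q.length < fuel → (∀ p ∈ q, ¬ p.2 < md) → bBfs adj md fuel V q = V := by
  intro fuel
  induction fuel with
  | zero => intro q V h _; exact absurd h (Nat.not_lt_zero _)
  | succ fuel ih =>
    intro q V h hall
    match q with
    | [] => rw [bBfs]
    | (node, depth) :: rest =>
      rw [bBfs, if_neg (hall _ List.mem_cons_self)]
      exact ih rest V (by simpa using Nat.lt_of_succ_lt_succ (by simpa using h))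
        (fun p hp => hall p (List.mem_cons_of_mem _ hp))

-- the queue loop, started on a two-band queue with enough fuel, is the layered recursion
theorem sim (relationships : List (List (String × String))) (md : Int) :
    ∀ (fuel : Nat) (b : Nat) (V : PySem.Set String) (L M : List String),
    pvNotV relationships V + L.length + M.length < fuel →
    bBfs (bAdj relationships) md fuel V
      (L.map (fun x => (x, md - (b : Int))) ++ M.map (fun x => (x, md - (b : Int) + 1)))
      = fLayers (bAdj relationships) b V L M := by
  intro fuel
  induction fuel with
  | zero => intro b V L M h; exact absurd h (Nat.not_lt_zero _)
  | succ fuel ihf =>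
    intro b
    induction b with
    | zero =>
      intro V L M h
      rw [fLayers]
      apply bBfs_drain
      · simp only [List.length_append, List.length_map]
        omega
      · intro p hp
        rcases List.mem_append.mp hp with hp | hp <;>
          obtain ⟨z, _, rfl⟩ := List.mem_map.mp hp <;> simp
    | succ b ihb =>
      intro V L M h
      cases L with
      | nil =>
        cases M with
        | nil => rw [fLayers]; simp [bBfs]
        | cons m M' =>
          rw [fLayers, if_neg (List.cons_ne_nil m M')]
          have hdep : (fun x : String => (x, md - ((b : Int) + 1) + 1)) = (fun x : String => (x, md - (b : Int))) := by
            funext z; simp; ring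
          simp only [List.map_nil, List.nil_append]
          push_cast
          rw [hdep]
          have := ihb V (m :: M') [] (by simp at h ⊢; omega)
          simpa using this
      | cons x L' =>
        rw [fLayers]
        rw [List.map_cons, List.cons_append, bBfs, if_pos (by push_cast; omega)]
        rw [inner_spec]
        have hδsub : ∀ y ∈ pvDelta V ((bAdj relationships).getD x []),
            y ∈ PySem.Set.ofList (pvAllNodes relationships) := by
          intro y hy
          have := ((mem_pvDelta y _ V).mp hy).1
          exact (PySem.Set.mem_ofList _ _).mpr
            (edge_mem_allNodes relationships x y ((adj_mem relationships x y).mp this))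
        have hδdisj : ∀ y ∈ pvDelta V ((bAdj relationships).getD x []), y ∉ V :=
          fun y hy => ((mem_pvDelta y _ V).mp hy).2
        have hcount := filter_split_len (PySem.Set.ofList (pvAllNodes relationships))
          (pvDelta V ((bAdj relationships).getD x [])) V
          (PySem.Set.nodup_ofList _) (nodup_pvDelta _ _) hδsub hδdisj
        have hq : (L'.map (fun x => (x, md - ((b:Nat) + 1 : Nat))) ++ M.map (fun x => (x, md - ((b:Nat) + 1 : Nat) + 1)))
            ++ (pvDelta V ((bAdj relationships).getD x [])).map (fun y => (y, md - ((b:Nat) + 1 : Nat) + 1))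
            = L'.map (fun x => (x, md - (((b:Nat) + 1 : Nat) : Int)))
              ++ (M ++ pvDelta V ((bAdj relationships).getD x [])).map (fun x => (x, md - (((b:Nat)+1 : Nat) : Int) + 1)) := by
          rw [List.map_append, List.append_assoc]
        rw [hq]
        rw [ihf (b+1) _ L' _ (by
          simp only [pvNotV] at h ⊢
          simp only [List.length_cons, List.length_append] at h ⊢
          omega)]

theorem allNodes_length (relationships : List (List (String × String))) :
    (pvAllNodes relationships).length = 2 * relationships.length := by
  induction relationships with
  | nil => rfl
  | cons r rels ih =>
    rw [pvAllNodes, List.flatMap_cons, List.length_append]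
    rw [pvAllNodes] at ih
    rw [ih]
    simp only [List.length_cons, List.length_nil]
    omega

-- ===== VERDICT (by name: the statement is the Claim_ definition above) =====
theorem get_connected_entities_py_spec : Claim_equal_get_connected_entities_py := by
  unfold Claim_equal_get_connected_entities_py
  intro e rels md _hdom
  unfold Spec_get_connected_entities_py
  unfold get_connected_entities_py get_connected_entities_py_alt
  have hof : PySem.Set.ofList [e] = [e] := PySem.Set.ofList_eq_self_of_nodup [e] (List.nodup_singleton e)
  rw [hof]
  have hfuel : pvNotV rels [e] + 1 + 0 < 2 * rels.length + 2 := by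
    have h1 : pvNotV rels [e] ≤ (PySem.Set.ofList (pvAllNodes rels)).length :=
      List.length_filter_le _ _
    have h2 : (PySem.Set.ofList (pvAllNodes rels)).length ≤ (pvAllNodes rels).length :=
      PySem.Set.length_ofList_le _
    have h3 := allNodes_length rels
    omega
  by_cases hmd : 0 ≤ md
  · have hq : [(e, (0 : Int))]
        = ([e].map (fun x => (x, md - (md.toNat : Int)))
          ++ ([] : List String).map (fun x => (x, md - (md.toNat : Int) + 1))) := by
      simp [Int.toNat_of_nonneg hmd]
    rw [hq, sim rels md _ md.toNat [e] [e] [] hfuel]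
    apply PySem.List.sorted_eq_sorted_of_perm _ _ _ (fun _ _ h => h)
    apply (List.perm_ext_iff_of_nodup
      (nodup_aLoop rels _ _ _ (by simp)) (nodup_fLayers _ _ _ _ _ (by simp))).mpr
    exact align rels md.toNat [e] [e] [e] [e] (fun _ => Iff.rfl) (fun _ => Iff.rfl)
  · have ht : md.toNat = 0 := Int.toNat_of_nonpos (le_of_lt (not_le.mp hmd))
    rw [ht, aLoop]
    rw [bBfs_drain (bAdj rels) md _ [(e, 0)] [e]
      (by simp only [List.length_cons, List.length_nil]; omega)
      (by intro p hp; simp only [List.mem_singleton] at hp; subst hp; simp only [not_lt]; omega)]
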